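-- pv_equiv track=rewrite | github.com/AdamZhouSE/pythonHomework | Code/CodeRecords/2845/60797/289434.py | find
-- ===== SOURCE A (Python) =====
-- def find(n, a, b):
--     for i in range(n):
--         for j in range(i,n):
--             if a[i]<a[j] and b[i]>b[j]:
--                 return 'Happy Alex'
--             elif a[i]>a[j] and b[i]<b[j]:
--                 return 'Happy Alex'
--     return 'Poor Alex'
-- ===== SOURCE B (Python) =====
-- def find(n, a, b):
--     # Sort pairs (a[i], b[i]) lexicographically; a discordant pair exists
--     # iff the b-components are not non-decreasing in this order.
--     pairs = sorted((a[i], b[i]) for i in range(n))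
--     for (x, y), (u, v) in zip(pairs, pairs[1:]):
--         if y > v:
--             return 'Happy Alex'
--     return 'Poor Alex'
-- ===== Notes on version B (the rewrite author's own statement) =====
-- stated objective: faster
-- what changed: Replaced the quadratic all-pairs scan by sorting the (a[i],b[i]) pairs lexicographically and checking adjacent pairs for a strict decrease in the b-component.
-- outside the precondition, e.g. on find(5, [2, 5], [6, 0, 7, -2, 8813, 7]): A returns 'Happy Alex', B raises IndexError
import Mathlib
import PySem

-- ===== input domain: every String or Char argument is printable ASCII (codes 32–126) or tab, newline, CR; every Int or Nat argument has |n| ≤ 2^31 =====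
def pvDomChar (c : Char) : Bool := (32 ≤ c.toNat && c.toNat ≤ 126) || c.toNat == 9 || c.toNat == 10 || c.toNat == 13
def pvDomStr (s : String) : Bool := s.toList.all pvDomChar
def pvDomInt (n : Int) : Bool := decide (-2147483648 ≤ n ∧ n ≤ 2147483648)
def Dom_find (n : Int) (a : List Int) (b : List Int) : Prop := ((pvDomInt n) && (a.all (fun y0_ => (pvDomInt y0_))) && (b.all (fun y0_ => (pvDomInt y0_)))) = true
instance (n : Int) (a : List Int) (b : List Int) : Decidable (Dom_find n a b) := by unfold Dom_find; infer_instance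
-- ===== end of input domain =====

-- B changes the algorithm: sort the (a[i],b[i]) pairs lexicographically and scan once
-- for an adjacent decrease of the b-component (O(n log n) instead of A's O(n^2)).

-- ===== PORT A =====
-- inner loop: for j in range(i, n): …  (early return 'Happy Alex' as Bool true)
def findInnerA (a : List Int) (b : List Int) (i : Int) : List Int → Bool
  | [] => false
  | j :: js =>
    if PySem.List.pyGetD a i 0 < PySem.List.pyGetD a j 0 ∧ PySem.List.pyGetD b i 0 > PySem.List.pyGetD b j 0 then true
    else if PySem.List.pyGetD a i 0 > PySem.List.pyGetD a j 0 ∧ PySem.List.pyGetD b i 0 < PySem.List.pyGetD b j 0 then true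
    else findInnerA a b i js

-- outer loop: for i in range(n): …
def findOuterA (n : Int) (a : List Int) (b : List Int) : List Int → Bool
  | [] => false
  | i :: is =>
    if findInnerA a b i (PySem.List.pyRange i n 1) then true else findOuterA n a b is

def find (n : Int) (a : List Int) (b : List Int) : String :=
  if findOuterA n a b (PySem.List.pyRange 0 n 1) then "Happy Alex" else "Poor Alex"

-- ===== PORT B =====
-- sorted((a[i], b[i]) for i in range(n))  — Python compares tuples lexicographically
def pairsB (n : Int) (a : List Int) (b : List Int) : List (Int × Int) :=
  PySem.List.sorted
    ((PySem.List.pyRange 0 n 1).map (fun i => (PySem.List.pyGetD a i 0, PySem.List.pyGetD b i 0)))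
    (fun q => toLex q) false

-- one pass over adjacent pairs: return 'Happy Alex' on a strict decrease of the b-component
def descentB : List (Int × Int) → Bool
  | x :: y :: rest => if x.2 > y.2 then true else descentB (y :: rest)
  | _ => false

def find_alt (n : Int) (a : List Int) (b : List Int) : String :=
  if descentB (pairsB n a b) then "Happy Alex" else "Poor Alex"

-- ===== PRECONDITION & SPEC =====
-- Pre_ excludes inputs with n > len(a) or n > len(b): there Python A raises IndexError unless its lazy scan
-- happens to find a discordant pair among the in-range prefix first, while B builds all n pairs and raises.
def Pre_find (n : Int) (a : List Int) (b : List Int) : Prop :=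
  n ≤ (a.length : Int) ∧ n ≤ (b.length : Int)
instance (n : Int) (a : List Int) (b : List Int) : Decidable (Pre_find n a b) := by unfold Pre_find; infer_instance
def pvWitness_find : Int × List Int × List Int := (2, [1, 2], [2, 1])

def Spec_find (n : Int) (a : List Int) (b : List Int) (out : String) : Prop := out = find_alt n a b
instance (n : Int) (a : List Int) (b : List Int) (out : String) : Decidable (Spec_find n a b out) := by unfold Spec_find; infer_instance

-- ===== CLAIM (what is proved, stated in full; the proofs are below) =====
def Claim_equal_find : Prop := ∀ (n : Int) (a : List Int) (b : List Int), Dom_find n a b → Pre_find n a b → Spec_find n a b (find n a b)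

-- ===== LEMMAS AND PROOFS =====

-- a discordant pair of (a,b)-values
def disc (x y : Int × Int) : Prop := (x.1 < y.1 ∧ y.2 < x.2) ∨ (y.1 < x.1 ∧ x.2 < y.2)

theorem disc_symm (x y : Int × Int) : disc x y → disc y x := by
  unfold disc; tauto

theorem disc_irrefl (x : Int × Int) : ¬ disc x x := by
  unfold disc; omega

def fAB (a b : List Int) (i : Int) : Int × Int :=
  (PySem.List.pyGetD a i 0, PySem.List.pyGetD b i 0)

theorem findInnerA_iff (a b : List Int) (i : Int) (js : List Int) :
    findInnerA a b i js = true ↔ ∃ j ∈ js, disc (fAB a b i) (fAB a b j) := by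
  induction js with
  | nil => simp [findInnerA]
  | cons j js ih =>
    simp only [findInnerA, List.mem_cons]
    split_ifs with h1 h2
    · simp only [true_iff]
      exact ⟨j, Or.inl rfl, Or.inl ⟨h1.1, h1.2⟩⟩
    · simp only [true_iff]
      exact ⟨j, Or.inl rfl, Or.inr ⟨h2.1, h2.2⟩⟩
    · rw [ih]
      constructor
      · rintro ⟨k, hk, hd⟩; exact ⟨k, Or.inr hk, hd⟩
      · rintro ⟨k, hk, hd⟩
        rcases hk with rfl | hk
        · exact absurd hd (by unfold disc fAB at *; omega)
        · exact ⟨k, hk, hd⟩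

theorem findOuterA_iff (n : Int) (a b : List Int) (is : List Int) :
    findOuterA n a b is = true ↔
      ∃ i ∈ is, ∃ j ∈ PySem.List.pyRange i n 1, disc (fAB a b i) (fAB a b j) := by
  induction is with
  | nil => simp [findOuterA]
  | cons i is ih =>
    simp only [findOuterA, List.mem_cons]
    split_ifs with h
    · rw [findInnerA_iff] at h
      simp only [true_iff]
      exact ⟨i, Or.inl rfl, h⟩
    · rw [ih]
      constructor
      · rintro ⟨k, hk, hd⟩; exact ⟨k, Or.inr hk, hd⟩
      · rintro ⟨k, hk, hd⟩
        rcases hk with rfl | hk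
        · exact absurd ((findInnerA_iff a b k _).2 hd) h
        · exact ⟨k, hk, hd⟩

-- A returns 'Happy Alex' iff there is a discordant pair at integer indices 0 ≤ i < j < n
theorem findA_exists (n : Int) (a b : List Int) :
    findOuterA n a b (PySem.List.pyRange 0 n 1) = true ↔
      ∃ i j : Int, 0 ≤ i ∧ i < j ∧ j < n ∧ disc (fAB a b i) (fAB a b j) := by
  rw [findOuterA_iff]
  constructor
  · rintro ⟨i, hi, j, hj, hd⟩
    rw [PySem.List.mem_pyRange_one] at hi hj
    rcases lt_or_eq_of_le hj.1 with h | rfl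
    · exact ⟨i, j, hi.1, h, hj.2, hd⟩
    · exact absurd hd (disc_irrefl _)
  · rintro ⟨i, j, h0, hij, hjn, hd⟩
    exact ⟨i, by rw [PySem.List.mem_pyRange_one]; omega,
           j, by rw [PySem.List.mem_pyRange_one]; omega, hd⟩

-- Pairwise over pyRange 0 n 1 unpacked to a statement over integer indices
theorem pairwise_pyRange_iff (n : Int) (S : Int → Int → Prop) :
    (PySem.List.pyRange 0 n 1).Pairwise S ↔
      ∀ i j : Int, 0 ≤ i → i < j → j < n → S i j := by
  rw [List.pairwise_iff_getElem]
  constructor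
  · intro h i j h0 hij hjn
    have hi : i.toNat < (PySem.List.pyRange 0 n 1).length := by
      rw [PySem.List.length_pyRange_one]; omega
    have hj : j.toNat < (PySem.List.pyRange 0 n 1).length := by
      rw [PySem.List.length_pyRange_one]; omega
    have := h i.toNat j.toNat hi hj (by omega)
    rwa [PySem.List.getElem_pyRange_one, PySem.List.getElem_pyRange_one,
      show ((0:Int) + i.toNat) = i by omega, show ((0:Int) + j.toNat) = j by omega] at this
  · intro h k l hk hl hkl
    rw [PySem.List.getElem_pyRange_one, PySem.List.getElem_pyRange_one]
    rw [PySem.List.length_pyRange_one] at hl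
    exact h _ _ (by omega) (by omega) (by omega)

-- the unsorted list of pairs
def LAB (n : Int) (a b : List Int) : List (Int × Int) :=
  (PySem.List.pyRange 0 n 1).map (fun i => fAB a b i)

theorem findA_pairwise (n : Int) (a b : List Int) :
    findOuterA n a b (PySem.List.pyRange 0 n 1) = true ↔
      ¬ (LAB n a b).Pairwise (fun x y => ¬ disc x y) := by
  rw [findA_exists, LAB, List.pairwise_map, pairwise_pyRange_iff]
  push_neg
  constructor
  · rintro ⟨i, j, h0, hij, hjn, hd⟩; exact ⟨i, j, h0, hij, hjn, hd⟩
  · rintro ⟨i, j, h0, hij, hjn, hd⟩; exact ⟨i, j, h0, hij, hjn, hd⟩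

-- descentB is false exactly when the b-components are pairwise non-decreasing
theorem descentB_false_iff (xs : List (Int × Int)) :
    descentB xs = false ↔ xs.Pairwise (fun x y => x.2 ≤ y.2) := by
  induction xs with
  | nil => simp [descentB]
  | cons x xs ih =>
    cases xs with
    | nil => simp [descentB]
    | cons y ys =>
      simp only [descentB]
      split_ifs with h
      · simp only [false_iff]
        intro hpw
        have := List.rel_of_pairwise_cons hpw (List.mem_cons_self)
        omega
      · rw [ih]
        constructor
        · intro hpw
          refine List.Pairwise.cons ?_ hpw
          intro z hz
          rcases List.mem_cons.1 hz with rfl | hz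
          · omega
          · have := List.rel_of_pairwise_cons hpw hz
            omega
        · exact fun hpw => hpw.tail

theorem lex_and_nodisc_snd_le (x y : Int × Int)
    (hlex : toLex x ≤ toLex y) (hnd : ¬ disc x y) : x.2 ≤ y.2 := by
  rw [Prod.Lex.toLex_le_toLex] at hlex
  unfold disc at hnd
  rcases hlex with h | ⟨h1, h2⟩ <;> omega

theorem lex_and_snd_le_nodisc (x y : Int × Int)
    (hlex : toLex x ≤ toLex y) (hsnd : x.2 ≤ y.2) : ¬ disc x y := by
  rw [Prod.Lex.toLex_le_toLex] at hlex
  unfold disc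
  rcases hlex with h | ⟨h1, h2⟩ <;> omega

theorem descentB_iff (n : Int) (a b : List Int) :
    descentB (pairsB n a b) = true ↔
      ¬ (LAB n a b).Pairwise (fun x y => ¬ disc x y) := by
  have hperm : (pairsB n a b).Perm (LAB n a b) := PySem.List.sorted_perm _ _ _
  rw [← List.Perm.pairwise_iff (fun h hd => h (disc_symm _ _ hd)) hperm]
  have hlex : (pairsB n a b).Pairwise (fun x y => toLex x ≤ toLex y) :=
    PySem.List.sorted_pairwise _ _
  rw [← Bool.not_eq_false, not_iff_not, descentB_false_iff]
  constructor
  · intro hpw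
    exact (hlex.and hpw).imp (fun h => lex_and_snd_le_nodisc _ _ h.1 h.2)
  · intro hpw
    exact (hlex.and hpw).imp (fun h => lex_and_nodisc_snd_le _ _ h.1 h.2)

-- ===== VERDICT (by name: the statement is the Claim_ definition above) =====
theorem find_spec : Claim_equal_find := by
  intro n a b _ _
  unfold Spec_find find find_alt
  have h := (findA_pairwise n a b).trans (descentB_iff n a b).symm
  rw [Bool.eq_iff_iff.mpr h]
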